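-- pv_equiv track=rewrite | github.com/agent-fox-dev/agent-fox-v3 | agent_fox/engine/graph_sync.py | _interleave_by_spec
-- ===== SOURCE A (Python) =====
-- def _spec_name(node_id: str) -> str:
--     """Extract spec name from node ID (everything before first colon).
--
--     Requirements: 69-REQ-3.1, 69-REQ-3.2, 69-REQ-3.E1
--     """
--     idx = node_id.find(":")
--     return node_id[:idx] if idx != -1 else node_id
--
-- def _spec_number(spec_name: str) -> tuple[int, str]:
--     """Extract numeric prefix for sorting. Returns (number, name) tuple.
--
--     Specs with numeric prefixes sort by number ascending.
--     Specs without numeric prefixes sort after all numbered specs.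
--
--     Requirements: 69-REQ-1.2, 69-REQ-1.4
--     """
--     parts = spec_name.split("_", 1)
--     try:
--         return (int(parts[0]), spec_name)
--     except (ValueError, IndexError):
--         return (float("inf"), spec_name)  # type: ignore[return-value]
--
-- def _interleave_by_spec(
--     ready: list[str],
--     duration_hints: dict[str, int] | None = None,
-- ) -> list[str]:
--     """Order ready tasks with spec-fair round-robin interleaving.
--
--     1. Group tasks by spec name (everything before first ':' in node ID).
--     2. Sort spec groups by spec number ascending (numeric prefix).
--     3. Within each group, sort by duration descending (if hints), else
--        alphabetically. Hinted tasks come before unhinted tasks.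
--     4. Interleave across groups: take one from each spec per round.
--
--     Args:
--         ready: List of ready node IDs.
--         duration_hints: Optional mapping of node_id -> predicted duration ms.
--
--     Returns:
--         Spec-fair-ordered list of node IDs.
--
--     Requirements: 69-REQ-1.1, 69-REQ-1.3, 69-REQ-2.1, 69-REQ-2.2, 69-REQ-2.3
--     """
--     if not ready:
--         return []
--
--     # Group tasks by spec name
--     groups: dict[str, list[str]] = {}
--     for node_id in ready:
--         spec = _spec_name(node_id)
--         groups.setdefault(spec, []).append(node_id)
--
--     # Sort spec groups by spec number ascending
--     sorted_specs = sorted(groups.keys(), key=_spec_number)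
--
--     # Sort within each group
--     sorted_groups: list[list[str]] = []
--     for spec in sorted_specs:
--         tasks = groups[spec]
--         if duration_hints:
--             hinted = [(t, duration_hints[t]) for t in tasks if t in duration_hints]
--             unhinted = [t for t in tasks if t not in duration_hints]
--             hinted.sort(key=lambda x: x[1], reverse=True)
--             unhinted.sort()
--             sorted_groups.append([t for t, _ in hinted] + unhinted)
--         else:
--             sorted_groups.append(sorted(tasks))
--
--     # Round-robin interleave across groups
--     result: list[str] = []
--     queues = [list(g) for g in sorted_groups]
--     while any(queues):
--         for q in queues:
--             if q:
--                 result.append(q.pop(0))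
--
--     return result
-- ===== SOURCE B (Python) =====
-- def _spec_name(node_id: str) -> str:
--     idx = node_id.find(":")
--     return node_id[:idx] if idx != -1 else node_id
--
--
-- def _spec_key(spec_name: str):
--     head = spec_name.split("_", 1)[0]
--     try:
--         return (0, int(head), spec_name)
--     except ValueError:
--         return (1, spec_name)
--
--
-- def _interleave_by_spec(ready, duration_hints=None):
--     if not ready:
--         return []
--     # spec names in sorted order, via ordered dedup instead of a dict of queues
--     specs = sorted(dict.fromkeys(_spec_name(t) for t in ready), key=_spec_key)
--     rows = []
--     for spec in specs:
--         tasks = [t for t in ready if _spec_name(t) == spec]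
--         if duration_hints:
--             row = sorted((t for t in tasks if t in duration_hints),
--                          key=lambda t: -duration_hints[t])
--             row += sorted(t for t in tasks if t not in duration_hints)
--         else:
--             row = sorted(tasks)
--         rows.append(row)
--     # round-robin = emit round i of every row, in spec order
--     width = max(len(r) for r in rows)
--     return [row[i] for i in range(width) for row in rows if i < len(row)]
-- ===== Notes on version B (the rewrite author's own statement) =====
-- stated objective: alternative
-- what changed: B groups by ordered dedup of spec names plus a per-spec filter instead of a dict of queues, and emits the round-robin as a single comprehension over round indices (row[i] for each round i and row) instead of repeatedly draining mutable queues with pop(0).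
import Mathlib
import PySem

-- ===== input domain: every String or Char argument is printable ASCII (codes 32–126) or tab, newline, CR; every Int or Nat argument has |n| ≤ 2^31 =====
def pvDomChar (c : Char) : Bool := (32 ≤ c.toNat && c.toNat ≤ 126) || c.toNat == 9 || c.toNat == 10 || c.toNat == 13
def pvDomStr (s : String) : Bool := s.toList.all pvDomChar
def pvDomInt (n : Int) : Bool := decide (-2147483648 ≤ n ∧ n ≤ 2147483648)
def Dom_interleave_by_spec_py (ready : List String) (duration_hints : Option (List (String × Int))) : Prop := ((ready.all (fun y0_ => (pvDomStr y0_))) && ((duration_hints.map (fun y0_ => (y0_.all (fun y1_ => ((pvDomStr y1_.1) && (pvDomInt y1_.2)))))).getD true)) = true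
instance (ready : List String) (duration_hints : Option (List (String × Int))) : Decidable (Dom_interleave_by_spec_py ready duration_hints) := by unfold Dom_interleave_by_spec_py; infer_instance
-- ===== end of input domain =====

-- B replaces A's dict-of-queues round-robin (repeated pop(0) passes) by grouping via ordered
-- dedup + per-spec filter and emitting round i of every row with a single comprehension
-- (objective: alternative decomposition, same observable result).

-- ===== shared helpers (the Python module helpers `_spec_name` / `_spec_number`, used by both sources) =====

-- _spec_name: everything before the first ':' (the whole id if there is none)
def pvSpecName (s : String) : String :=
  let idx := PySem.Str.find s ":"
  if idx ≠ -1 then PySem.Str.slice s none (some idx) else s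

-- parts[0] of spec_name.split("_", 1): the first part of the full split is the same list head
def pvHead (s : String) : String :=
  match PySem.Str.split? s "_" with
  | some (p :: _) => p
  | _ => s

-- _spec_number's sort key (int(head), name) resp. (float('inf'), name), encoded as a List Int:
-- [0, n] sorts before [1] exactly as every int sorts before inf, and the trailing code points
-- give Python's string comparison for the tie-break; List-lex order = Python tuple order, exactly.
def pvSpecKey (s : String) : List Int :=
  (match PySem.Int.ofStr? (pvHead s) with
   | some n => [0, n]
   | none => [1]) ++ s.toList.map (fun c => (c.toNat : Int))

-- ===== PORT A =====

-- the queues after one round of `q.pop(0)` on each non-empty queue (empty queues are untouched)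
def pvTails : List (List String) → List (List String)
  | [] => []
  | q :: r => q.tail :: pvTails r

-- termination of the drain loop: one round strictly shrinks the total length
theorem pvDrain_dec (qs : List (List String)) (h : qs.any (fun q => !q.isEmpty) = true) :
    ((pvTails qs).map List.length).sum < (qs.map List.length).sum := by
  induction qs with
  | nil => simp at h
  | cons q qs ih =>
    simp only [List.any_cons, Bool.or_eq_true] at h
    simp only [pvTails, List.map_cons, List.sum_cons, List.length_tail]
    have hle : ((pvTails qs).map List.length).sum ≤ (qs.map List.length).sum := by
      clear h ih
      induction qs with
      | nil => simp [pvTails]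
      | cons r rs ihr =>
        simp only [pvTails, List.map_cons, List.sum_cons, List.length_tail]
        have : r.length - 1 ≤ r.length := Nat.sub_le _ _
        omega
    rcases h with h | h
    · have hq : q ≠ [] := by simpa [List.isEmpty_iff] using h
      have : 0 < q.length := List.length_pos_iff.mpr hq
      omega
    · have := ih h
      have : q.length - 1 ≤ q.length := Nat.sub_le _ _
      omega

-- the `while any(queues): for q in queues: if q: result.append(q.pop(0))` loop
def pvDrain (qs : List (List String)) : List String :=
  if h : qs.any (fun q => !q.isEmpty) = true then
    qs.filterMap List.head? ++ pvDrain (pvTails qs)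
  else []
termination_by (qs.map List.length).sum
decreasing_by exact pvDrain_dec qs h

def interleave_by_spec_py (ready : List String) (duration_hints : Option (List (String × Int))) : List String :=
  if ready = [] then []
  else
    -- groups.setdefault(spec, []).append(node_id) ≡ groups[spec] = groups.get(spec, []) + [node_id]
    let groups : PySem.Dict String (List String) :=
      ready.foldl (fun d t => d.modify (pvSpecName t) [] (fun l => l ++ [t])) PySem.Dict.empty
    let sortedSpecs := PySem.List.sorted groups.keys pvSpecKey
    -- `if duration_hints:` — None and {} are both falsy
    let hasHints : Bool := match duration_hints with | none => false | some l => !l.isEmpty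
    let hints : PySem.Dict String Int := PySem.Dict.ofList (duration_hints.getD [])
    let sortedGroups := sortedSpecs.map (fun spec =>
      let tasks := groups.getD spec []   -- groups[spec]; spec is a key, so no KeyError
      if hasHints then
        -- duration_hints[t] is guarded by `t in duration_hints`, so getD is exact here
        let hinted := (tasks.filter (fun t => hints.contains t)).map (fun t => (t, hints.getD t 0))
        let unhinted := tasks.filter (fun t => !hints.contains t)
        (PySem.List.sorted hinted (fun p => p.2) true).map (fun p => p.1)
          ++ PySem.List.sorted unhinted (fun t => t)
      else PySem.List.sorted tasks (fun t => t))
    pvDrain sortedGroups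

-- ===== PORT B =====

def interleave_by_spec_py_alt (ready : List String) (duration_hints : Option (List (String × Int))) : List String :=
  if ready = [] then []
  else
    -- sorted(dict.fromkeys(...), key=_spec_number)
    let specs := PySem.List.sorted (PySem.List.dedup (ready.map pvSpecName)) pvSpecKey
    let hasHints : Bool := match duration_hints with | none => false | some l => !l.isEmpty
    let hints : PySem.Dict String Int := PySem.Dict.ofList (duration_hints.getD [])
    let rows := specs.map (fun spec =>
      let tasks := ready.filter (fun t => pvSpecName t == spec)
      if hasHints then
        PySem.List.sorted (tasks.filter (fun t => hints.contains t)) (fun t => -(hints.getD t 0))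
          ++ PySem.List.sorted (tasks.filter (fun t => !hints.contains t)) (fun t => t)
      else PySem.List.sorted tasks (fun t => t))
    -- max(len(r) for r in rows): rows is non-empty here, so folding from 0 over Nat is that max
    let width := (rows.map List.length).foldl max 0
    -- [row[i] for i in range(width) for row in rows if i < len(row)]
    (List.range width).flatMap (fun i => rows.filterMap (fun r => r[i]?))

-- ===== PRECONDITION & SPEC =====
def Spec_interleave_by_spec_py (ready : List String) (duration_hints : Option (List (String × Int))) (out : List String) : Prop := out = interleave_by_spec_py_alt ready duration_hints
instance (ready : List String) (duration_hints : Option (List (String × Int))) (out : List String) : Decidable (Spec_interleave_by_spec_py ready duration_hints out) := by unfold Spec_interleave_by_spec_py; infer_instance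

-- ===== CLAIM (what is proved, stated in full; the proofs are below) =====
def Claim_equal_interleave_by_spec_py : Prop := ∀ (ready : List String) (duration_hints : Option (List (String × Int))), Dom_interleave_by_spec_py ready duration_hints → Spec_interleave_by_spec_py ready duration_hints (interleave_by_spec_py ready duration_hints)

-- ===== LEMMAS AND PROOFS =====

theorem pvTails_eq (qs : List (List String)) : pvTails qs = qs.map List.tail := by
  induction qs with
  | nil => rfl
  | cons q r ih => simp [pvTails, ih]

theorem pv_insertBy_map {α β : Type} (f : α → β) (p : β → β → Bool) (p' : α → α → Bool)
    (h : ∀ a b, p (f a) (f b) = p' a b) (x : α) (acc : List α) :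
    (PySem.List.insertBy p' x acc).map f = PySem.List.insertBy p (f x) (acc.map f) := by
  induction acc with
  | nil => rfl
  | cons y ys ih =>
    simp only [PySem.List.insertBy, List.map_cons, h]
    split <;> simp_all

theorem pv_foldl_insertBy_map {α β : Type} (f : α → β) (p : β → β → Bool) (p' : α → α → Bool)
    (h : ∀ a b, p (f a) (f b) = p' a b) (ts : List α) (acc : List α) :
    (ts.foldl (fun acc t => PySem.List.insertBy p' t acc) acc).map f
      = ts.foldl (fun acc t => PySem.List.insertBy p (f t) acc) (acc.map f) := by
  induction ts generalizing acc with
  | nil => rfl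
  | cons t ts ih => simpa [pv_insertBy_map f p p' h] using ih (PySem.List.insertBy p' t acc)

-- A's "sort the (t, d[t]) pairs by d[t] descending, then drop the durations" is B's
-- "sort the ids by -d[t] ascending" (both stable, int keys)
theorem pv_sorted_pairs (g : String → Int) (ts : List String) :
    (PySem.List.sorted (ts.map (fun t => (t, g t))) (fun p => p.2) true).map (fun p => p.1)
      = PySem.List.sorted ts (fun t => -(g t)) := by
  rw [PySem.List.sorted_rev_eq_foldl_insertBy, PySem.List.sorted_eq_foldl_insertBy]
  rw [List.foldl_map]
  have hkey : (fun a b : String => decide (-(g a) < -(g b))) = fun a b => decide (g b < g a) := by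
    funext a b; simp
  rw [hkey]
  have h1 : (List.foldl (fun acc t => PySem.List.insertBy
        (fun a b : String × Int => decide (b.2 < a.2)) (t, g t) acc) [] ts)
      = (List.foldl (fun acc t => PySem.List.insertBy
        (fun a b : String => decide (g b < g a)) t acc) [] ts).map (fun t => (t, g t)) := by
    simpa using (pv_foldl_insertBy_map (fun t => (t, g t))
      (fun a b : String × Int => decide (b.2 < a.2))
      (fun a b : String => decide (g b < g a)) (fun a b => rfl) ts []).symm
  rw [h1, List.map_map]
  simp [Function.comp_def]

theorem pv_foldl_max_sub_one (ls : List Nat) (a : Nat) :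
    (ls.map (fun n => n - 1)).foldl max (a - 1) = (ls.foldl max a) - 1 := by
  induction ls generalizing a with
  | nil => rfl
  | cons x ls ih =>
    simp only [List.map_cons, List.foldl_cons]
    rw [show max (a - 1) (x - 1) = max a x - 1 by omega]
    exact ih (max a x)

theorem pv_foldl_max_pos (ls : List Nat) (a : Nat) :
    0 < ls.foldl max a ↔ 0 < a ∨ ∃ x ∈ ls, 0 < x := by
  induction ls generalizing a with
  | nil => simp
  | cons x ls ih =>
    simp only [List.foldl_cons]
    rw [ih (max a x)]
    simp [or_assoc]

theorem pv_any_iff_width_pos (qs : List (List String)) :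
    (qs.any fun q => !q.isEmpty) = true ↔ 0 < (qs.map List.length).foldl max 0 := by
  rw [pv_foldl_max_pos]
  simp [List.any_eq_true, List.length_pos_iff]

theorem pv_drain_done (qs : List (List String)) (h : ¬ (qs.any fun q => !q.isEmpty) = true) :
    pvDrain qs
      = (List.range ((qs.map List.length).foldl max 0)).flatMap
          (fun i => qs.filterMap (fun r => r[i]?)) := by
  rw [pvDrain, dif_neg h]
  have h0 : (qs.map List.length).foldl max 0 = 0 := by
    by_contra hc
    exact h ((pv_any_iff_width_pos qs).mpr (Nat.pos_of_ne_zero hc))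
  simp [h0]

theorem pv_drain_eq_rounds_aux (n : Nat) : ∀ (qs : List (List String)),
    (qs.map List.length).sum ≤ n →
    pvDrain qs
      = (List.range ((qs.map List.length).foldl max 0)).flatMap
          (fun i => qs.filterMap (fun r => r[i]?)) := by
  induction n with
  | zero =>
    intro qs hq
    apply pv_drain_done
    intro hA
    rw [List.any_eq_true] at hA
    obtain ⟨q, hmem, hq'⟩ := hA
    have hqne : q ≠ [] := by simpa [List.isEmpty_iff] using hq'
    have h1 : 0 < q.length := List.length_pos_iff.mpr hqne
    have h2 : q.length ≤ (qs.map List.length).sum :=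
      List.single_le_sum (fun x _ => Nat.zero_le x) _ (List.mem_map_of_mem hmem)
    omega
  | succ n ih =>
    intro qs hq
    by_cases h : (qs.any fun q => !q.isEmpty) = true
    · rw [pvDrain, dif_pos h]
      have hw : 0 < (qs.map List.length).foldl max 0 := (pv_any_iff_width_pos qs).mp h
      obtain ⟨w, hw'⟩ : ∃ w, (qs.map List.length).foldl max 0 = w + 1 :=
        ⟨_, (Nat.succ_pred_eq_of_pos hw).symm⟩
      have htails : ((pvTails qs).map List.length).foldl max 0 = w := by
        have he : (pvTails qs).map List.length = (qs.map List.length).map (fun n => n - 1) := by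
          simp [pvTails_eq, List.map_map, Function.comp_def, List.length_tail]
        rw [he, show (0 : Nat) = 0 - 1 from rfl, pv_foldl_max_sub_one, hw']
        omega
      have hsum : ((pvTails qs).map List.length).sum ≤ n := by
        have := pvDrain_dec qs h
        omega
      rw [ih (pvTails qs) hsum, htails, hw', List.range_succ_eq_map]
      simp only [List.flatMap_cons, List.flatMap_map]
      congr 1
      · simp [List.head?_eq_getElem?]
      · simp [pvTails_eq, List.filterMap_map, List.getElem?_tail]
    · exact pv_drain_done qs h

theorem pv_drain_eq_rounds (qs : List (List String)) :
    pvDrain qs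
      = (List.range ((qs.map List.length).foldl max 0)).flatMap
          (fun i => qs.filterMap (fun r => r[i]?)) :=
  pv_drain_eq_rounds_aux _ qs le_rfl

theorem pv_groups_keys (ready : List String) :
    (ready.foldl (fun d t => d.modify (pvSpecName t) [] (fun l => l ++ [t]))
        PySem.Dict.empty).keys
      = PySem.List.dedup (ready.map pvSpecName) := by
  have h := PySem.Dict.keys_foldl_modify_key ready pvSpecName []
    (fun _ t l => l ++ [t]) PySem.Dict.empty
  simpa [PySem.List.dedup, PySem.Set.update_nil_left] using h

theorem pv_groups_getD (ready : List String) (spec : String) :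
    (ready.foldl (fun d t => d.modify (pvSpecName t) [] (fun l => l ++ [t]))
        PySem.Dict.empty).getD spec []
      = ready.filter (fun t => pvSpecName t == spec) := by
  have h1 : ready.foldl (fun d t => d.modify (pvSpecName t) [] (fun l => l ++ [t]))
        PySem.Dict.empty
      = (ready.map (fun t => (pvSpecName t, t))).foldl
        (fun d p => d.modify p.1 [] (fun l => l ++ [p.2])) PySem.Dict.empty := by
    rw [List.foldl_map]
  rw [h1, PySem.Dict.getD_foldl_modify_append]
  simp [List.filter_map, List.map_map, Function.comp_def]

-- ===== VERDICT (by name: the statement is the Claim_ definition above) =====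
theorem interleave_by_spec_py_spec : Claim_equal_interleave_by_spec_py := by
  intro ready dh _
  unfold Spec_interleave_by_spec_py
  by_cases hr : ready = []
  · simp [interleave_by_spec_py, interleave_by_spec_py_alt, hr]
  · simp only [interleave_by_spec_py, interleave_by_spec_py_alt, if_neg hr]
    rw [pv_groups_keys]
    have hrow : (fun spec =>
        let tasks := (ready.foldl (fun d t => d.modify (pvSpecName t) [] (fun l => l ++ [t]))
            PySem.Dict.empty).getD spec []
        if (match dh with | none => false | some l => !l.isEmpty) then
          let hinted := (tasks.filter (fun t => (PySem.Dict.ofList (dh.getD [])).contains t)).map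
            (fun t => (t, (PySem.Dict.ofList (dh.getD [])).getD t 0))
          let unhinted := tasks.filter (fun t => !(PySem.Dict.ofList (dh.getD [])).contains t)
          (PySem.List.sorted hinted (fun p => p.2) true).map (fun p => p.1)
            ++ PySem.List.sorted unhinted (fun t => t)
        else PySem.List.sorted tasks (fun t => t))
      = (fun spec =>
        let tasks := ready.filter (fun t => pvSpecName t == spec)
        if (match dh with | none => false | some l => !l.isEmpty) then
          PySem.List.sorted (tasks.filter (fun t => (PySem.Dict.ofList (dh.getD [])).contains t))
              (fun t => -((PySem.Dict.ofList (dh.getD [])).getD t 0))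
            ++ PySem.List.sorted (tasks.filter (fun t => !(PySem.Dict.ofList (dh.getD [])).contains t))
              (fun t => t)
        else PySem.List.sorted tasks (fun t => t)) := by
      funext spec
      simp only [pv_groups_getD ready spec]
      cases hH : (match dh with | none => false | some l => !l.isEmpty) with
      | false => simp
      | true =>
        simp only [if_pos]
        congr 1
        exact pv_sorted_pairs (fun t => (PySem.Dict.ofList (dh.getD [])).getD t 0)
          ((ready.filter (fun t => pvSpecName t == spec)).filter
            (fun t => (PySem.Dict.ofList (dh.getD [])).contains t))
    rw [hrow]
    exact pv_drain_eq_rounds _
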